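-- pv_equiv track=rewrite | github.com/sadeddo/Quest-Codewars | Step8/main.py | centaine
-- ===== SOURCE A (Python) =====
-- def centaine(b, rom, str1):
--     a = int(str1[b])
--     if a < 4:
--         i = 0
--         while i < a:
--             rom += "C"
--             i += 1
--     elif a == 4:
--         rom += "CD"
--     elif 9 > a > 4:
--         rom += "D"+ ("C" * (a - 5))
--     elif a == 9:
--         rom += "CM"
--     return rom
-- ===== SOURCE B (Python) =====
-- # Data-driven rewrite: one lookup table replaces the if/elif cascade and the counting while-loop.
-- ROM_HUNDREDS = ["", "C", "CC", "CCC", "CD", "D", "DC", "DCC", "DCCC", "CM"]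
--
-- def centaine(b, rom, str1):
--     return rom + ROM_HUNDREDS[int(str1[b])]
-- ===== Notes on version B (the rewrite author's own statement) =====
-- stated objective: simpler
-- what changed: Replaces the four-way if/elif cascade and the counting while-loop with a single indexed lookup into a constant table of the ten Roman hundreds strings.
import Mathlib
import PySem

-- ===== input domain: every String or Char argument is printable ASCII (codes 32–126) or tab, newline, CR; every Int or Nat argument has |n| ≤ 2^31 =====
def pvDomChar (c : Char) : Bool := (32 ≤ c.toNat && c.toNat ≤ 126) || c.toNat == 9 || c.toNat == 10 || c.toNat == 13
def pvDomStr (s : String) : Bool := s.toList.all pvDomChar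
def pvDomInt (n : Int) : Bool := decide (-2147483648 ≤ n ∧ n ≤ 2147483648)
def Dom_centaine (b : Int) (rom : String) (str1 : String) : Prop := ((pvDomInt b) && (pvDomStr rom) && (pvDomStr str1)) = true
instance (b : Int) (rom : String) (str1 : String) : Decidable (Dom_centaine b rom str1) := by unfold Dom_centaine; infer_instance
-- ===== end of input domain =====

-- B replaces A's if/elif cascade and counting while-loop by one lookup in a constant table (objective: simpler).

-- ===== PORT A =====
-- Python "C" * n (empty for n ≤ 0); exact hand port of str*int
def strTimes (s : String) (n : Int) : String :=
  String.join (List.replicate n.toNat s)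

-- the 'while i < a: rom += "C"; i += 1' loop of A
def whileC (rom : String) (i a : Int) : String :=
  if i < a then whileC (rom ++ "C") (i + 1) a else rom
termination_by (a - i).toNat
decreasing_by omega

def centaine (b : Int) (rom : String) (str1 : String) : String :=
  match PySem.Str.pyGet? str1 b with
  | none => rom        -- IndexError in Python: excluded by Pre_
  | some c =>
    match PySem.Int.ofStr? (String.ofList [c]) with
    | none => rom      -- ValueError in Python: excluded by Pre_
    | some a =>
      if a < 4 then whileC rom 0 a
      else if a = 4 then rom ++ "CD"
      else if 9 > a ∧ a > 4 then rom ++ ("D" ++ strTimes "C" (a - 5))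
      else if a = 9 then rom ++ "CM"
      else rom

-- ===== PORT B =====
def romHundreds : List String := ["", "C", "CC", "CCC", "CD", "D", "DC", "DCC", "DCCC", "CM"]

def centaine_alt (b : Int) (rom : String) (str1 : String) : String :=
  match PySem.Str.pyGet? str1 b with
  | none => rom        -- IndexError in Python: excluded by Pre_
  | some c =>
    match PySem.Int.ofStr? (String.ofList [c]) with
    | none => rom      -- ValueError in Python: excluded by Pre_
    | some a =>
      match PySem.List.pyGet? romHundreds a with
      | some s => rom ++ s
      | none => rom    -- IndexError in Python: unreachable for a digit (0..9)

-- ===== PRECONDITION & SPEC =====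
-- Pre_ admits exactly the inputs where A returns: b a valid Python index into str1 and
-- the character there an ASCII digit (otherwise int(str1[b]) raises Index/ValueError).
def Pre_centaine (b : Int) (rom : String) (str1 : String) : Prop :=
  ((PySem.Str.pyGet? str1 b).map (fun c => 48 ≤ c.toNat && c.toNat ≤ 57)).getD false = true
instance (b : Int) (rom : String) (str1 : String) : Decidable (Pre_centaine b rom str1) := by unfold Pre_centaine; infer_instance

def pvWitness_centaine : Int × String × String := (0, "X", "3")

def Spec_centaine (b : Int) (rom : String) (str1 : String) (out : String) : Prop := out = centaine_alt b rom str1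
instance (b : Int) (rom : String) (str1 : String) (out : String) : Decidable (Spec_centaine b rom str1 out) := by unfold Spec_centaine; infer_instance

-- ===== CLAIM (what is proved, stated in full; the proofs are below) =====
def Claim_equal_centaine : Prop := ∀ (b : Int) (rom : String) (str1 : String), Dom_centaine b rom str1 → Pre_centaine b rom str1 → Spec_centaine b rom str1 (centaine b rom str1)

-- ===== LEMMAS AND PROOFS =====
lemma char_eq_of_toNat (c d : Char) (h : c.toNat = d.toNat) : c = d :=
  Char.ext (UInt32.toNat_inj.mp h)

lemma digit_cases (c : Char) (h : (48 ≤ c.toNat && c.toNat ≤ 57) = true) :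
    c = '0' ∨ c = '1' ∨ c = '2' ∨ c = '3' ∨ c = '4' ∨ c = '5' ∨ c = '6' ∨ c = '7' ∨ c = '8' ∨ c = '9' := by
  simp only [Bool.and_eq_true, decide_eq_true_eq] at h
  obtain ⟨h1', h2'⟩ := h
  have hnat : c.toNat = 48 ∨ c.toNat = 49 ∨ c.toNat = 50 ∨ c.toNat = 51 ∨ c.toNat = 52 ∨ c.toNat = 53 ∨ c.toNat = 54 ∨ c.toNat = 55 ∨ c.toNat = 56 ∨ c.toNat = 57 := by omega
  rcases hnat with h|h|h|h|h|h|h|h|h|h <;>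
    first
    | exact Or.inl (char_eq_of_toNat c '0' h)
    | exact Or.inr (Or.inl (char_eq_of_toNat c '1' h))
    | exact Or.inr (Or.inr (Or.inl (char_eq_of_toNat c '2' h)))
    | exact Or.inr (Or.inr (Or.inr (Or.inl (char_eq_of_toNat c '3' h))))
    | exact Or.inr (Or.inr (Or.inr (Or.inr (Or.inl (char_eq_of_toNat c '4' h)))))
    | exact Or.inr (Or.inr (Or.inr (Or.inr (Or.inr (Or.inl (char_eq_of_toNat c '5' h))))))
    | exact Or.inr (Or.inr (Or.inr (Or.inr (Or.inr (Or.inr (Or.inl (char_eq_of_toNat c '6' h)))))))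
    | exact Or.inr (Or.inr (Or.inr (Or.inr (Or.inr (Or.inr (Or.inr (Or.inl (char_eq_of_toNat c '7' h))))))))
    | exact Or.inr (Or.inr (Or.inr (Or.inr (Or.inr (Or.inr (Or.inr (Or.inr (Or.inl (char_eq_of_toNat c '8' h)))))))))
    | exact Or.inr (Or.inr (Or.inr (Or.inr (Or.inr (Or.inr (Or.inr (Or.inr (Or.inr (char_eq_of_toNat c '9' h)))))))))

lemma inner_eq (rom : String) (a : Int) (h0 : 0 ≤ a) (h9 : a ≤ 9) :
    (if a < 4 then whileC rom 0 a
     else if a = 4 then rom ++ "CD"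
     else if 9 > a ∧ a > 4 then rom ++ ("D" ++ strTimes "C" (a - 5))
     else if a = 9 then rom ++ "CM"
     else rom)
    = (match PySem.List.pyGet? romHundreds a with
       | some s => rom ++ s
       | none => rom) := by
  interval_cases a <;>
    simp [whileC, strTimes, romHundreds, PySem.List.pyGet?, PySem.List.pyIdx?, String.append_assoc]
  all_goals decide

-- ===== VERDICT (by name: the statement is the Claim_ definition above) =====
theorem centaine_spec : Claim_equal_centaine := by
  intro b rom str1 _ hpre
  unfold Spec_centaine centaine centaine_alt
  unfold Pre_centaine at hpre
  cases hg : PySem.Str.pyGet? str1 b with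
  | none => rw [hg] at hpre
  | some c =>
    rw [hg] at hpre
    simp only [Option.map_some, Option.getD_some] at hpre
    have hof : ∃ k : Int, PySem.Int.ofStr? (String.ofList [c]) = some k ∧ 0 ≤ k ∧ k ≤ 9 := by
      rcases digit_cases c hpre with h|h|h|h|h|h|h|h|h|h <;> subst h
      · exact ⟨0, by decide, by decide, by decide⟩
      · exact ⟨1, by decide, by decide, by decide⟩
      · exact ⟨2, by decide, by decide, by decide⟩
      · exact ⟨3, by decide, by decide, by decide⟩
      · exact ⟨4, by decide, by decide, by decide⟩
      · exact ⟨5, by decide, by decide, by decide⟩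
      · exact ⟨6, by decide, by decide, by decide⟩
      · exact ⟨7, by decide, by decide, by decide⟩
      · exact ⟨8, by decide, by decide, by decide⟩
      · exact ⟨9, by decide, by decide, by decide⟩
    obtain ⟨k, hk, hk0, hk9⟩ := hof
    simp only [hk]
    exact inner_eq rom k hk0 hk9
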